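-- pv_equiv track=rewrite | github.com/daniel-reich/ubiquitous-fiesta | XALogvSrMr3LRwXPH_13.py | is_shuffled_well
-- ===== SOURCE A (Python) =====
-- def is_shuffled_well(lst):
--   count = 0
--   count_desc = 0
--   for i in range(len(lst)-1):
--     if lst[i] + 1 == lst[i+1]:
--       count += 1
--     else:
--       count = 0
--     if count == 2:
--       return False
--     if lst[i] - 1 == lst[i+1]:
--       count_desc += 1
--     else:
--       count_desc = 0
--     if count_desc == 2:
--       return False
--   return True
-- ===== SOURCE B (Python) =====
-- def is_shuffled_well(lst):
--   return not any((b == a + 1 and c == b + 1) or (b == a - 1 and c == b - 1)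
--                  for a, b, c in zip(lst, lst[1:], lst[2:]))
-- ===== Notes on version B (the rewrite author's own statement) =====
-- stated objective: simpler
-- what changed: Replaces the stateful scan with two reset counters by a stateless one-liner: any() over overlapping triples zip(lst, lst[1:], lst[2:]) detecting a +1/+1 or -1/-1 window directly.
import Mathlib
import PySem

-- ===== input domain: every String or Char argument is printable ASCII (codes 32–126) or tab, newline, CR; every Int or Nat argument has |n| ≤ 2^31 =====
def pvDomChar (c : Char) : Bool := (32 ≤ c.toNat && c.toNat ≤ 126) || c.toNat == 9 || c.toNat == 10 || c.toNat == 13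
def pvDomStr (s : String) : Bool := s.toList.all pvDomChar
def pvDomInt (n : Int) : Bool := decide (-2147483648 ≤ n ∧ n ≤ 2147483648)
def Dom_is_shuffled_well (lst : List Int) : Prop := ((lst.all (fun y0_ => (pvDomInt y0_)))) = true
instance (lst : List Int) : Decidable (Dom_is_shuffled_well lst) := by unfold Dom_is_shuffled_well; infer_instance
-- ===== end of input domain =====

-- B drops the two running counters for a stateless scan of overlapping triples (objective: simpler).
-- ===== PORT A =====
-- loop over adjacent pairs carrying the two counters, early-returning false at count == 2
def pvLoopA : List Int → Int → Int → Bool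
  | a :: b :: rest, count, count_desc =>
    let count := if a + 1 = b then count + 1 else 0
    if count = 2 then false
    else
      let count_desc := if a - 1 = b then count_desc + 1 else 0
      if count_desc = 2 then false
      else pvLoopA (b :: rest) count count_desc
  | _, _, _ => true

def is_shuffled_well (lst : List Int) : Bool := pvLoopA lst 0 0

-- ===== PORT B =====
def is_shuffled_well_alt (lst : List Int) : Bool :=
  !(((lst.zip (lst.drop 1)).zip (lst.drop 2)).any fun p =>
      (p.1.2 == p.1.1 + 1 && p.2 == p.1.2 + 1) || (p.1.2 == p.1.1 - 1 && p.2 == p.1.2 - 1))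

-- ===== PRECONDITION & SPEC =====
def Spec_is_shuffled_well (lst : List Int) (out : Bool) : Prop := out = is_shuffled_well_alt lst
instance (lst : List Int) (out : Bool) : Decidable (Spec_is_shuffled_well lst out) := by unfold Spec_is_shuffled_well; infer_instance

-- ===== CLAIM (what is proved, stated in full; the proofs are below) =====
def Claim_equal_is_shuffled_well : Prop := ∀ (lst : List Int), Dom_is_shuffled_well lst → Spec_is_shuffled_well lst (is_shuffled_well lst)

-- ===== LEMMAS AND PROOFS =====

theorem alt_two (a b : Int) : is_shuffled_well_alt [a, b] = true := rfl

theorem alt_cons (a b c : Int) (l : List Int) :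
    is_shuffled_well_alt (a :: b :: c :: l) =
      (!((b == a + 1 && c == b + 1) || (b == a - 1 && c == b - 1)) &&
        is_shuffled_well_alt (b :: c :: l)) := by
  simp [is_shuffled_well_alt, List.any_cons, Bool.not_or]

theorem pvLoopA_alt (l : List Int) : ∀ (a b : Int),
    pvLoopA (b :: l) (if a + 1 = b then 1 else 0) (if a - 1 = b then 1 else 0) =
      is_shuffled_well_alt (a :: b :: l) := by
  induction l with
  | nil => intro a b; simp [pvLoopA, alt_two]
  | cons c rest ih =>
    intro a b
    rw [alt_cons, ← ih b c]
    simp only [pvLoopA]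
    by_cases h1 : b + 1 = c <;> by_cases h2 : a + 1 = b <;>
      by_cases h3 : b - 1 = c <;> by_cases h4 : a - 1 = b <;>
      simp [h1, h2, h3, h4] <;> omega


-- ===== VERDICT (by name: the statement is the Claim_ definition above) =====
theorem is_shuffled_well_spec : Claim_equal_is_shuffled_well := by
  intro lst _
  unfold Spec_is_shuffled_well is_shuffled_well
  match lst with
  | [] => rfl
  | [a] => rfl
  | a :: b :: l =>
    rw [← pvLoopA_alt l a b]
    simp only [pvLoopA]
    by_cases h2 : a + 1 = b <;> by_cases h4 : a - 1 = b <;> simp [h2, h4]
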